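-- pv_equiv track=rewrite | github.com/wowchois/study | Algorithm/Programmers/스킬트리.py | solution
-- ===== SOURCE A (Python) =====
-- from collections import deque
--
-- def solution(skill, skill_trees):
--     answer = 0
--
--     for txt in skill_trees :
--         s_que = deque(skill)
--         for a in txt :
--             if a in skill and a != s_que.popleft() : break
--         else : answer += 1
--
--     return answer
-- ===== SOURCE B (Python) =====
-- def solution(skill, skill_trees):
--     answer = 0
--     for txt in skill_trees:
--         filtered = [c for c in txt if c in skill]
--         for i, c in enumerate(filtered):
--             if c != skill[i]:
--                 break
--         else:
--             answer += 1
--     return answer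
-- ===== Notes on version B (the rewrite author's own statement) =====
-- stated objective: simpler
-- what changed: Replaces the one-pass deque simulation by a two-pass decomposition: first filter each tree to its skill characters (a single comprehension), then compare that filtered sequence positionally against skill by direct indexing, dropping the deque entirely.
import Mathlib
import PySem

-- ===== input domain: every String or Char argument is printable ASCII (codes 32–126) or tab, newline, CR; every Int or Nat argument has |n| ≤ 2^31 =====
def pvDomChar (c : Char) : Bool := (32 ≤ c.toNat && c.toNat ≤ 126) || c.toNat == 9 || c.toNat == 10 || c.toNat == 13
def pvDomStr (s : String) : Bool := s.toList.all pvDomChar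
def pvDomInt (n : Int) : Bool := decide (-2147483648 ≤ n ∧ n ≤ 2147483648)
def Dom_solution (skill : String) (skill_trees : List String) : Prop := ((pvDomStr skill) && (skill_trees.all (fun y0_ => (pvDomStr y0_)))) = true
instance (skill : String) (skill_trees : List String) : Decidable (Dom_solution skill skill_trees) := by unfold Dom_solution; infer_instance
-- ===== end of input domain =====

-- B replaces A's one-pass deque simulation by a two-pass decomposition (filter then positional
-- compare by direct indexing); same cost, simpler. Equivalence is about the return value.

-- ===== PORT A =====
-- inner loop of A: que simulates deque(skill); some true = loop finished (count), some false = break,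
-- none = popleft on empty deque (IndexError)
def chkDequeA (skillL : List Char) : List Char → List Char → Option Bool
  | _, [] => some true
  | que, a :: rest =>
    if a ∈ skillL then
      match que with
      | [] => none
      | q :: qs => if a ≠ q then some false else chkDequeA skillL qs rest
    else chkDequeA skillL que rest

def solution (skill : String) (skill_trees : List String) : Int :=
  (skill_trees.foldl (fun acc txt =>
      match acc, chkDequeA skill.toList skill.toList txt.toList with
      | some n, some true => some (n + 1)
      | some n, some false => some n
      | _, _ => none) (some (0 : Int))).getD 0

-- ===== PORT B =====
-- inner loop of B: compare filtered sequence positionally against skill[i]; none = IndexError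
def chkIdxB (skillL : List Char) : Nat → List Char → Option Bool
  | _, [] => some true
  | i, c :: rest =>
    match PySem.List.pyGet? skillL (i : Int) with
    | none => none
    | some s => if c ≠ s then some false else chkIdxB skillL (i + 1) rest

def solution_alt (skill : String) (skill_trees : List String) : Int :=
  (skill_trees.foldl (fun acc txt =>
      let filtered := txt.toList.filter (fun c => c ∈ skill.toList)
      acc.bind (fun n =>
        (chkIdxB skill.toList 0 filtered).map (fun ok => if ok then n + 1 else n)))
    (some (0 : Int))).getD 0

-- ===== PRECONDITION & SPEC =====
-- Pre_ excludes exactly the inputs on which Python A raises IndexError (popleft from an empty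
-- deque): some tree's skill-character subsequence has skill as a strict prefix.
def Pre_solution (skill : String) (skill_trees : List String) : Prop :=
  ∀ t ∈ skill_trees,
    ¬ (skill.toList <+: (t.toList.filter (fun c => c ∈ skill.toList)) ∧
       skill.toList.length < (t.toList.filter (fun c => c ∈ skill.toList)).length)
instance (skill : String) (skill_trees : List String) : Decidable (Pre_solution skill skill_trees) := by unfold Pre_solution; infer_instance

def pvWitness_solution : String × List String := ("CBD", ["BACDE", "CBADF", "AECB", "BDA"])

def Spec_solution (skill : String) (skill_trees : List String) (out : Int) : Prop := out = solution_alt skill skill_trees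
instance (skill : String) (skill_trees : List String) (out : Int) : Decidable (Spec_solution skill skill_trees out) := by unfold Spec_solution; infer_instance

-- ===== CLAIM (what is proved, stated in full; the proofs are below) =====
def Claim_equal_solution : Prop := ∀ (skill : String) (skill_trees : List String), Dom_solution skill skill_trees → Pre_solution skill skill_trees → Spec_solution skill skill_trees (solution skill skill_trees)

-- ===== LEMMAS AND PROOFS =====

-- proof-only helper: positional compare against an explicit remaining-queue list
def chkQueC : List Char → List Char → Option Bool
  | _, [] => some true
  | [], _ :: _ => none
  | q :: qs, c :: rest => if c ≠ q then some false else chkQueC qs rest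

theorem chkIdxB_eq_chkQueC (skillL fs : List Char) (i : Nat) :
    chkIdxB skillL i fs = chkQueC (skillL.drop i) fs := by
  induction fs generalizing i with
  | nil => cases skillL.drop i <;> rfl
  | cons c rest ih =>
    have hh : PySem.List.pyGet? skillL (i : Int) = skillL[i]? := PySem.List.pyGet?_natCast ..
    cases hd : skillL.drop i with
    | nil =>
      have h1 : skillL[i]? = none := by rw [← List.head?_drop, hd]; rfl
      simp [chkIdxB, chkQueC, hh, h1]
    | cons s qs =>
      have h1 : skillL[i]? = some s := by rw [← List.head?_drop, hd]; rfl
      have h2 : skillL.drop (i + 1) = qs := by rw [← List.tail_drop, hd]; rfl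
      rw [chkIdxB, hh, h1]
      simp only [chkQueC]
      split
      · rfl
      · rw [ih, h2]

theorem chkDequeA_eq_chkQueC (skillL : List Char) (txt que : List Char) :
    chkDequeA skillL que txt = chkQueC que (txt.filter (fun c => c ∈ skillL)) := by
  induction txt generalizing que with
  | nil => cases que <;> rfl
  | cons a rest ih =>
    by_cases hm : a ∈ skillL
    · have hf : (a :: rest).filter (fun c => c ∈ skillL) =
          a :: rest.filter (fun c => c ∈ skillL) := by simp [List.filter, hm]
      rw [hf]; simp only [chkDequeA]
      cases que with
      | nil => simp [hm, chkQueC]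
      | cons q qs =>
        simp only [hm, if_true, chkQueC]
        split
        · rfl
        · exact ih qs
    · have hf : (a :: rest).filter (fun c => c ∈ skillL) =
          rest.filter (fun c => c ∈ skillL) := by simp [List.filter, hm]
      rw [hf]; simp only [chkDequeA]
      simp [hm, ih]

theorem chk_agree (skill : String) (txt : String) :
    chkDequeA skill.toList skill.toList txt.toList =
      chkIdxB skill.toList 0 (txt.toList.filter (fun c => c ∈ skill.toList)) := by
  rw [chkIdxB_eq_chkQueC, List.drop_zero, chkDequeA_eq_chkQueC]

-- ===== VERDICT (by name: the statement is the Claim_ definition above) =====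
theorem solution_spec : Claim_equal_solution := by
  intro skill skill_trees _ _
  unfold Spec_solution solution solution_alt
  congr 1
  apply PySem.List.foldl_congr_mem
  intro acc txt _
  rw [chk_agree]
  cases acc with
  | none => rfl
  | some n =>
    cases h : chkIdxB skill.toList 0 (txt.toList.filter (fun c => c ∈ skill.toList)) with
    | none => simp [h]
    | some b => cases b <;> simp [h]
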